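-- pv_equiv track=rewrite | github.com/montypylons/mihansolo_bot | misc/reconstruct.py | fix_text_block
-- ===== SOURCE A (Python) =====
-- def fix_text_block(text: str) -> str:
--     lines = [line.strip() for line in text.splitlines()]
--
--     words = []
--     current = []
--
--     for line in lines:
--         if line == "":  # blank line = end of word
--             if current:
--                 words.append("".join(current))
--                 current = []
--         else:
--             current.append(line)
--
--     # add last word if not followed by blank line
--     if current:
--         words.append("".join(current))
--
--     return " ".join(words)
-- ===== SOURCE B (Python) =====
-- def fix_text_block(text: str) -> str:
--     lines = [line.strip() for line in text.splitlines()]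
--     words = []
--     while lines:
--         if lines[0] == "":
--             lines = lines[1:]
--         else:
--             k = 0
--             while k < len(lines) and lines[k] != "":
--                 k += 1
--             words.append("".join(lines[:k]))
--             lines = lines[k:]
--     return " ".join(words)
-- ===== Notes on version B (the rewrite author's own statement) =====
-- stated objective: alternative
-- what changed: Replaced A's one-pass state machine (pending 'current' accumulator plus end-of-input flush) by a run-splitting loop that repeatedly measures the leading nonblank run, joins it into a word and slices it off, so there is no maintained pending state and no trailing flush.
import Mathlib
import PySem

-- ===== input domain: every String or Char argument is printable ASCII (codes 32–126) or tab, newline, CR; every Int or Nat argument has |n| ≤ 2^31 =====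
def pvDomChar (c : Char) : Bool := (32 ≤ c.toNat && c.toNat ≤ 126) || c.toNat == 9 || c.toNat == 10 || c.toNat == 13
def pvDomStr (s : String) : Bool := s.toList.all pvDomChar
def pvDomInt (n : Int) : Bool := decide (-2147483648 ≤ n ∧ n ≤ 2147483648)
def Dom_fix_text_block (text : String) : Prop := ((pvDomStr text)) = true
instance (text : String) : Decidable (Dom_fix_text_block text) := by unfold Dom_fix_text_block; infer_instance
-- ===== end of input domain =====

-- B replaces A's pending-accumulator state machine with a run-splitting loop (alternative decomposition, same result).

-- ===== PORT A =====
-- one loop step of A: blank line flushes the pending 'current' (if any), nonblank appends to it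
def pvStepA (st : List String × List String) (line : String) : List String × List String :=
  if line = "" then
    if st.2 ≠ [] then (st.1 ++ [PySem.Str.join "" st.2], []) else st
  else (st.1, st.2 ++ [line])

-- A's trailing flush: "add last word if not followed by blank line"
def pvFinish (st : List String × List String) : List String :=
  if st.2 ≠ [] then st.1 ++ [PySem.Str.join "" st.2] else st.1

def fix_text_block (text : String) : String :=
  PySem.Str.join " "
    (pvFinish (((PySem.Str.splitlines text).map PySem.Str.strip).foldl pvStepA ([], [])))

-- ===== PORT B =====
-- B's inner while: length k of the leading run of nonblank lines
def pvRunLen : List String → Nat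
  | [] => 0
  | l :: ls => if l = "" then 0 else pvRunLen ls + 1

-- B's outer while: drop a blank line, or split off the leading nonblank run as one word
def pvWordsB : List String → List String
  | [] => []
  | l :: ls =>
    if l = "" then pvWordsB ls
    else
      let k := pvRunLen (l :: ls)
      PySem.Str.join "" ((l :: ls).take k) :: pvWordsB ((l :: ls).drop k)
termination_by ls => ls.length
decreasing_by
  · simp
  · simp only [pvRunLen, if_neg (by assumption)]
    simp

def fix_text_block_alt (text : String) : String :=
  PySem.Str.join " " (pvWordsB ((PySem.Str.splitlines text).map PySem.Str.strip))

-- ===== PRECONDITION & SPEC =====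
def Spec_fix_text_block (text : String) (out : String) : Prop := out = fix_text_block_alt text
instance (text : String) (out : String) : Decidable (Spec_fix_text_block text out) := by unfold Spec_fix_text_block; infer_instance

-- ===== CLAIM (what is proved, stated in full; the proofs are below) =====
def Claim_equal_fix_text_block : Prop := ∀ (text : String), Dom_fix_text_block text → Spec_fix_text_block text (fix_text_block text)

-- ===== LEMMAS AND PROOFS =====
lemma take_runLen_ne (ls : List String) : ∀ l ∈ ls.take (pvRunLen ls), l ≠ "" := by
  induction ls with
  | nil => simp
  | cons l ls ih =>
    by_cases h : l = "" <;> simp [pvRunLen, h]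
    intro x hx
    exact ih x hx

lemma drop_runLen_head (ls : List String) :
    ls.drop (pvRunLen ls) = [] ∨ ∃ t, ls.drop (pvRunLen ls) = "" :: t := by
  induction ls with
  | nil => simp
  | cons l ls ih =>
    by_cases h : l = ""
    · right; exact ⟨ls, by simp [pvRunLen, h]⟩
    · simpa [pvRunLen, h] using ih

lemma foldl_run (run : List String) (h : ∀ l ∈ run, l ≠ "") :
    ∀ (rest : List String) (w c : List String),
      List.foldl pvStepA (w, c) (run ++ rest) = List.foldl pvStepA (w, c ++ run) rest := by
  induction run with
  | nil => simp
  | cons l run ih =>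
    intro rest w c
    have hl : l ≠ "" := h l (by simp)
    simp only [List.cons_append, List.foldl_cons, pvStepA, if_neg hl]
    rw [ih (fun x hx => h x (by simp [hx])) rest w (c ++ [l])]
    simp

lemma foldl_finish (ls : List String) :
    ∀ w, pvFinish (List.foldl pvStepA (w, []) ls) = w ++ pvWordsB ls := by
  induction ls using pvWordsB.induct with
  | case1 => intro w; simp [pvFinish, pvWordsB]
  | case2 ls ih =>
    intro w
    simpa [pvStepA, pvWordsB] using ih w
  | case3 l ls hl k ih =>
    intro w
    have hk : k = pvRunLen ls + 1 := by simp [k, pvRunLen, hl]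
    have hrun : ∀ x ∈ (l :: ls).take k, x ≠ "" := take_runLen_ne (l :: ls)
    have hsplit : (l :: ls).take k ++ (l :: ls).drop k = l :: ls := List.take_append_drop k (l :: ls)
    have htne : (l :: ls).take k ≠ [] := by
      rw [hk]; simp [List.take_succ_cons]
    have hfold : List.foldl pvStepA (w, []) (l :: ls) =
        List.foldl pvStepA (w, (l :: ls).take k) ((l :: ls).drop k) := by
      conv_lhs => rw [← hsplit]
      rw [foldl_run _ hrun]
      simp
    rcases drop_runLen_head (l :: ls) with hd | ⟨t, hd⟩
    · rw [show (l :: ls).drop (pvRunLen (l :: ls)) = (l :: ls).drop k from rfl] at hd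
      rw [hfold, hd]
      simp only [List.foldl_nil, pvFinish, if_pos htne]
      simp only [pvWordsB, if_neg hl]
      rw [show pvRunLen (l :: ls) = k from rfl, hd]
      simp [pvWordsB]
    · rw [show (l :: ls).drop (pvRunLen (l :: ls)) = (l :: ls).drop k from rfl] at hd
      have h1 : List.foldl pvStepA (w, (l :: ls).take k) ((l :: ls).drop k) =
          List.foldl pvStepA (w ++ [PySem.Str.join "" ((l :: ls).take k)], []) t := by
        rw [hd]
        simp [pvStepA, htne]
      have h2 : List.foldl pvStepA (w ++ [PySem.Str.join "" ((l :: ls).take k)], [])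
            ((l :: ls).drop k) =
          List.foldl pvStepA (w ++ [PySem.Str.join "" ((l :: ls).take k)], []) t := by
        rw [hd]; simp [pvStepA]
      rw [hfold, h1, ← h2, ih]
      simp only [pvWordsB, if_neg hl]
      rw [show pvRunLen (l :: ls) = k from rfl, hd]
      simp [pvWordsB]

-- ===== VERDICT (by name: the statement is the Claim_ definition above) =====
theorem fix_text_block_spec : Claim_equal_fix_text_block := by
  intro text _
  unfold Spec_fix_text_block fix_text_block fix_text_block_alt
  rw [foldl_finish]
  simp
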